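-- pv_equiv track=rewrite | github.com/AxelMatstoms/aoc23 | 12/solve.py | preprocess_longest
-- ===== SOURCE A (Python) =====
-- def preprocess_longest(pattern, groups):
--     max_group = max(groups)
--     ret_pattern = list(pattern)
--     chunk = 0
--     for i, ch in enumerate(pattern):
--         if ch == ".":
--             chunk = 0
--         elif ch == "?":
--             if chunk == max_group:
--                 ret_pattern[i] = "."
--                 if i - chunk - 1 >= 0:
--                     ret_pattern[i - chunk - 1] = "."
--             chunk = 0
--         elif ch == "#":
--             chunk += 1
--
--     return "".join(ret_pattern)
-- ===== SOURCE B (Python) =====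
-- def preprocess_longest(pattern, groups):
--     max_group = max(groups)
--     delims = [(i, ch) for i, ch in enumerate(pattern) if ch in ".?"]
--     marks = set()
--     start = 0
--     for d, ch in delims:
--         if ch == "?":
--             c = pattern[start:d].count("#")
--             if c == max_group:
--                 marks.add(d)
--                 if d - c - 1 >= 0:
--                     marks.add(d - c - 1)
--         start = d + 1
--     return "".join("." if i in marks else ch for i, ch in enumerate(pattern))
-- ===== Notes on version B (the rewrite author's own statement) =====
-- stated objective: alternative
-- what changed: A's single char-by-char loop with a running '#' counter and in-place list edits is replaced by a two-phase pass: collect the delimiter positions ('.'/'?'), count '#' per segment with a slice, record positions to blank in a set, and rebuild the string once at the end.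
import Mathlib
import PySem

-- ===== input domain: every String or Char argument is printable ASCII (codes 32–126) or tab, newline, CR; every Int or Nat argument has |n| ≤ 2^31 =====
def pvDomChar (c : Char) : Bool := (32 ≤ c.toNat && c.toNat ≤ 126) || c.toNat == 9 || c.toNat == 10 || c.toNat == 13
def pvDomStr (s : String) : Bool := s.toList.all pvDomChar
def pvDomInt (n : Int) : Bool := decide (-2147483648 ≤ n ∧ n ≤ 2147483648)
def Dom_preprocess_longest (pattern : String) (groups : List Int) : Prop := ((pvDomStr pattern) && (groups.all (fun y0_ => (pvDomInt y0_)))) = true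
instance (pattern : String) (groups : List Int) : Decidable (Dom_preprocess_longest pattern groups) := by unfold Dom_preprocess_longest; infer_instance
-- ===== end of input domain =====

-- B replaces A's char-by-char running '#' counter with a two-phase pass: collect the
-- delimiter positions ('.'/'?') first, count '#' per segment by slicing, record the
-- positions to blank in a set, and rebuild the string once at the end (objective: alternative).

-- ===== PORT A =====
def preprocess_longest (pattern : String) (groups : List Int) : String :=
  -- max(groups): raises ValueError on [], excluded by Pre_; getD's default is never used inside Pre_
  let max_group : Int := (PySem.List.max? groups (fun x => x)).getD 0
  let st := (PySem.List.enumerate pattern.toList 0).foldl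
    (fun (st : List Char × Int) ic =>
      let ret := st.1
      let chunk := st.2
      let i := ic.1
      let ch := ic.2
      if ch == '.' then (ret, 0)
      else if ch == '?' then
        (if chunk == max_group then
          let ret1 := ret.set i.toNat '.'
          let ret2 := if i - chunk - 1 ≥ 0 then ret1.set (i - chunk - 1).toNat '.' else ret1
          (ret2, 0)
        else (ret, 0))
      else if ch == '#' then (ret, chunk + 1)
      else (ret, chunk))
    (pattern.toList, 0)
  String.mk st.1

-- ===== PORT B =====
def preprocess_longest_alt (pattern : String) (groups : List Int) : String :=
  let max_group : Int := (PySem.List.max? groups (fun x => x)).getD 0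
  let cs := pattern.toList
  let delims := (PySem.List.enumerate cs 0).filter (fun ic => ic.2 == '.' || ic.2 == '?')
  let st := delims.foldl
    (fun (st : PySem.Set Int × Int) dc =>
      let marks := st.1
      let d := dc.1
      let ch := dc.2
      if ch == '?' then
        let c : Int := ((PySem.List.slice cs (some st.2) (some d)).count '#' : Int)
        if c == max_group then
          let marks1 := PySem.Set.add marks d
          let marks2 := if d - c - 1 ≥ 0 then PySem.Set.add marks1 (d - c - 1) else marks1
          (marks2, d + 1)
        else (marks, d + 1)
      else (marks, d + 1))
    (PySem.Set.empty, 0)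
  String.mk ((PySem.List.enumerate cs 0).map
    (fun ic => if PySem.Set.contains st.1 ic.1 then '.' else ic.2))

-- ===== PRECONDITION & SPEC =====
-- Pre_ excludes only groups = [], on which Python's max(groups) raises ValueError.
def Pre_preprocess_longest (pattern : String) (groups : List Int) : Prop := groups ≠ []
instance (pattern : String) (groups : List Int) : Decidable (Pre_preprocess_longest pattern groups) := by unfold Pre_preprocess_longest; infer_instance
def pvWitness_preprocess_longest : String × List Int := ("##?.#?", [2])
def Spec_preprocess_longest (pattern : String) (groups : List Int) (out : String) : Prop := out = preprocess_longest_alt pattern groups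
instance (pattern : String) (groups : List Int) (out : String) : Decidable (Spec_preprocess_longest pattern groups out) := by unfold Spec_preprocess_longest; infer_instance

-- ===== CLAIM (what is proved, stated in full; the proofs are below) =====
def Claim_equal_preprocess_longest : Prop := ∀ (pattern : String) (groups : List Int), Dom_preprocess_longest pattern groups → Pre_preprocess_longest pattern groups → Spec_preprocess_longest pattern groups (preprocess_longest pattern groups)

-- ===== LEMMAS AND PROOFS =====

-- A's loop body, with max_group fixed.
def pvStepA (mg : Int) (st : List Char × Int) (ic : Int × Char) : List Char × Int :=
  let ret := st.1
  let chunk := st.2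
  let i := ic.1
  let ch := ic.2
  if ch == '.' then (ret, 0)
  else if ch == '?' then
    (if chunk == mg then
      let ret1 := ret.set i.toNat '.'
      let ret2 := if i - chunk - 1 ≥ 0 then ret1.set (i - chunk - 1).toNat '.' else ret1
      (ret2, 0)
    else (ret, 0))
  else if ch == '#' then (ret, chunk + 1)
  else (ret, chunk)

-- B's loop body exactly as written in the port.
def pvStepB0 (mg : Int) (cs : List Char) (st : PySem.Set Int × Int) (dc : Int × Char) : PySem.Set Int × Int :=
  if dc.2 == '?' then
    let c : Int := ((PySem.List.slice cs (some st.2) (some dc.1)).count '#' : Int)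
    if c == mg then
      let marks1 := PySem.Set.add st.1 dc.1
      let marks2 := if dc.1 - c - 1 ≥ 0 then PySem.Set.add marks1 (dc.1 - c - 1) else marks1
      (marks2, dc.1 + 1)
    else (st.1, dc.1 + 1)
  else (st.1, dc.1 + 1)

-- B's loop body fused with the delimiter filter (identity on non-delimiters).
def pvStepB (mg : Int) (cs : List Char) (st : PySem.Set Int × Int) (ic : Int × Char) : PySem.Set Int × Int :=
  if (ic.2 == '.' || ic.2 == '?') then
    (if ic.2 == '?' then
      let c : Int := ((PySem.List.slice cs (some st.2) (some ic.1)).count '#' : Int)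
      if c == mg then
        let marks1 := PySem.Set.add st.1 ic.1
        let marks2 := if ic.1 - c - 1 ≥ 0 then PySem.Set.add marks1 (ic.1 - c - 1) else marks1
        (marks2, ic.1 + 1)
      else (st.1, ic.1 + 1)
    else (st.1, ic.1 + 1))
  else st

-- B's final rebuild of the string from the mark set.
def pvRender (cs : List Char) (m : PySem.Set Int) : List Char :=
  (PySem.List.enumerate cs 0).map (fun ic => if PySem.Set.contains m ic.1 then '.' else ic.2)

theorem pvRender_length (cs : List Char) (m : PySem.Set Int) : (pvRender cs m).length = cs.length := by
  simp [pvRender, PySem.List.length_enumerate]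

theorem pvRender_getElem (cs : List Char) (m : PySem.Set Int) (p : Nat) (hp : p < cs.length) :
    (pvRender cs m)[p]'(by simpa [pvRender_length] using hp)
      = (if PySem.Set.contains m (p : Int) then '.' else cs[p]) := by
  simp [pvRender, PySem.List.getElem_enumerate]

theorem pvRender_empty (cs : List Char) : pvRender cs PySem.Set.empty = cs := by
  simp [pvRender, PySem.Set.empty, PySem.Set.contains, PySem.List.map_snd_enumerate]

theorem contains_add {m : PySem.Set Int} {x y : Int} :
    PySem.Set.contains (PySem.Set.add m x) y = (PySem.Set.contains m y || y == x) := by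
  by_cases h : PySem.Set.contains m x <;>
    simp [PySem.Set.add, PySem.Set.contains, List.contains_eq_mem] at * <;>
    by_cases hy : y = x <;> simp [hy, h]

theorem pvRender_add (cs : List Char) (m : PySem.Set Int) (i : Int) (h0 : 0 ≤ i)
    (h1 : i.toNat < cs.length) :
    pvRender cs (PySem.Set.add m i) = (pvRender cs m).set i.toNat '.' := by
  apply List.ext_getElem
  · simp [pvRender_length]
  · intro p hp hp'
    have hpcs : p < cs.length := by simpa [pvRender_length] using hp
    rw [pvRender_getElem cs _ p hpcs, List.getElem_set, contains_add]
    by_cases hpi : p = i.toNat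
    · have hpint : (p : Int) = i := by omega
      subst hpint
      simp
    · have hpint : (p : Int) ≠ i := by omega
      have h2 : i.toNat ≠ p := fun h => hpi h.symm
      rw [pvRender_getElem cs m p hpcs]
      simp [hpint, h2]

-- one step of the slice count: appending the next character
theorem count_take_succ (cs : List Char) (s k : Nat) (hsk : s ≤ k) (c : Char)
    (hc : cs[k]? = some c) :
    ((cs.drop s).take (k + 1 - s)).count '#'
      = ((cs.drop s).take (k - s)).count '#' + (if c == '#' then 1 else 0) := by
  have h1 : k + 1 - s = (k - s) + 1 := by omega
  have h2 : (cs.drop s)[k - s]? = some c := by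
    rw [List.getElem?_drop]
    simpa [Nat.add_sub_cancel' hsk] using hc
  rw [h1, List.take_add_one, h2, List.count_append]
  by_cases hch : c = '#' <;> simp [hch]

-- Main invariant: running A's loop over the suffix equals rendering B's marks,
-- provided chunk is the '#'-count of the current segment.
theorem pvMain (mg : Int) (cs : List Char) :
    ∀ (l pre : List Char) (ret : List Char) (chunk : Int) (marks : PySem.Set Int) (start : Int),
    cs = pre ++ l →
    0 ≤ start → start.toNat ≤ pre.length →
    chunk = (((cs.drop start.toNat).take (pre.length - start.toNat)).count '#' : Int) →
    ret = pvRender cs marks →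
    ((PySem.List.enumerate l (pre.length : Int)).foldl (pvStepA mg) (ret, chunk)).1
      = pvRender cs ((PySem.List.enumerate l (pre.length : Int)).foldl (pvStepB mg cs) (marks, start)).1 := by
  intro l
  induction l with
  | nil =>
    intro pre ret chunk marks start hcs hs0 hs1 hchunk hret
    simpa [PySem.List.enumerate] using hret
  | cons c l' ih =>
    intro pre ret chunk marks start hcs hs0 hs1 hchunk hret
    have hklen : pre.length < cs.length := by subst hcs; simp
    have hck : cs[pre.length]? = some c := by
      subst hcs
      rw [List.getElem?_append_right (le_refl _)]
      simp
    have hcs' : cs = (pre ++ [c]) ++ l' := by simpa using hcs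
    have hlen' : ((pre ++ [c]).length : Int) = (pre.length : Int) + 1 := by simp
    rw [PySem.List.enumerate_cons]
    simp only [List.foldl_cons]
    -- case on the character c
    by_cases hdot : c = '.'
    · -- delimiter '.', chunk resets, start moves to k+1
      have hA : pvStepA mg (ret, chunk) ((pre.length : Int), c) = (ret, 0) := by
        simp [pvStepA, hdot]
      have hB : pvStepB mg cs (marks, start) ((pre.length : Int), c) = (marks, (pre.length : Int) + 1) := by
        simp [pvStepB, hdot]
      rw [hA, hB, ← hlen']
      apply ih (pre ++ [c]) ret 0 marks ((pre ++ [c]).length : Int) hcs' (by positivity)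
        (by simp) (by simp) hret
    · by_cases hq : c = '?'
      · -- delimiter '?': conditions agree since chunk equals B's slice count
        have hcount : ((PySem.List.slice cs (some start) (some (pre.length : Int))).count '#' : Int) = chunk := by
          rw [PySem.List.slice_toNat cs hs0 (by positivity)]
          simp [hchunk]
        by_cases hmg : chunk = mg
        · -- marks get updated; renders stay in sync
          have hi0 : ((pre.length : Int)).toNat < cs.length := by simpa using hklen
          have hchunk0 : 0 ≤ chunk := by rw [hchunk]; positivity
          have hr1 : ret.set ((pre.length : Int)).toNat '.'
              = pvRender cs (PySem.Set.add marks (pre.length : Int)) := by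
            rw [hret, pvRender_add cs marks _ (by positivity) hi0]
          by_cases hguard : (pre.length : Int) - chunk - 1 ≥ 0
          · have t1 : (c == '.') = false := by simp [hdot]
            have t2 : (c == '?') = true := by simp [hq]
            have t3 : (chunk == mg) = true := by simp [hmg]
            have hj : ((pre.length : Int) - chunk - 1).toNat < cs.length := by
              subst hcs; simp; omega
            have hr2 : (ret.set ((pre.length : Int)).toNat '.').set ((pre.length : Int) - chunk - 1).toNat '.'
                = pvRender cs (PySem.Set.add (PySem.Set.add marks (pre.length : Int)) ((pre.length : Int) - chunk - 1)) := by
              rw [hr1, pvRender_add cs _ _ hguard hj]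
            have hA : pvStepA mg (ret, chunk) ((pre.length : Int), c)
                = ((ret.set ((pre.length : Int)).toNat '.').set ((pre.length : Int) - chunk - 1).toNat '.', 0) := by
              simp only [pvStepA, t1, t2, t3, Bool.false_eq_true, if_false, if_true]
              rw [if_pos hguard]
            have hB : pvStepB mg cs (marks, start) ((pre.length : Int), c)
                = (PySem.Set.add (PySem.Set.add marks (pre.length : Int)) ((pre.length : Int) - chunk - 1), (pre.length : Int) + 1) := by
              simp only [pvStepB, t1, t2, hcount, t3, Bool.or_true, if_true]
              rw [if_pos hguard]
            rw [hA, hB, ← hlen']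
            apply ih (pre ++ [c]) _ 0 _ ((pre ++ [c]).length : Int) hcs' (by positivity)
              (by simp) (by simp) hr2
          · have t1 : (c == '.') = false := by simp [hdot]
            have t2 : (c == '?') = true := by simp [hq]
            have t3 : (chunk == mg) = true := by simp [hmg]
            have hA : pvStepA mg (ret, chunk) ((pre.length : Int), c)
                = (ret.set ((pre.length : Int)).toNat '.', 0) := by
              simp only [pvStepA, t1, t2, t3, Bool.false_eq_true, if_false, if_true]
              rw [if_neg hguard]
            have hB : pvStepB mg cs (marks, start) ((pre.length : Int), c)
                = (PySem.Set.add marks (pre.length : Int), (pre.length : Int) + 1) := by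
              simp only [pvStepB, t1, t2, hcount, t3, Bool.or_true, if_true]
              rw [if_neg hguard]
            rw [hA, hB, ← hlen']
            apply ih (pre ++ [c]) _ 0 _ ((pre ++ [c]).length : Int) hcs' (by positivity)
              (by simp) (by simp) hr1
        · have hA : pvStepA mg (ret, chunk) ((pre.length : Int), c) = (ret, 0) := by
            simp [pvStepA, hq, hmg]
          have hB : pvStepB mg cs (marks, start) ((pre.length : Int), c) = (marks, (pre.length : Int) + 1) := by
            simp only [pvStepB, hq]
            simp [hcount, hmg]
          rw [hA, hB, ← hlen']
          apply ih (pre ++ [c]) ret 0 marks ((pre ++ [c]).length : Int) hcs' (by positivity)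
            (by simp) (by simp) hret
      · -- non-delimiter: B's state is unchanged
        have hB : pvStepB mg cs (marks, start) ((pre.length : Int), c) = (marks, start) := by
          simp [pvStepB, hdot, hq]
        have hstep : ((cs.drop start.toNat).take ((pre ++ [c]).length - start.toNat)).count '#'
            = ((cs.drop start.toNat).take (pre.length - start.toNat)).count '#'
              + (if c == '#' then 1 else 0) := by
          have : (pre ++ [c]).length - start.toNat = pre.length + 1 - start.toNat := by simp
          rw [this]
          exact count_take_succ cs start.toNat pre.length hs1 c hck
        by_cases hh : c = '#'
        · have hA : pvStepA mg (ret, chunk) ((pre.length : Int), c) = (ret, chunk + 1) := by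
            simp [pvStepA, hh]
          rw [hA, hB, ← hlen']
          apply ih (pre ++ [c]) ret (chunk + 1) marks start hcs' hs0 (by simp; omega)
            (by rw [hstep, hchunk]; simp [hh]) hret
        · have hA : pvStepA mg (ret, chunk) ((pre.length : Int), c) = (ret, chunk) := by
            simp [pvStepA, hdot, hq, hh]
          rw [hA, hB, ← hlen']
          apply ih (pre ++ [c]) ret chunk marks start hcs' hs0 (by simp; omega)
            (by rw [hstep, hchunk]; simp [hh]) hret

-- ===== VERDICT (by name: the statement is the Claim_ definition above) =====
theorem preprocess_longest_spec : Claim_equal_preprocess_longest := by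
  intro pattern groups _ _
  show String.mk
      ((PySem.List.enumerate pattern.toList 0).foldl
        (pvStepA ((PySem.List.max? groups (fun x => x)).getD 0)) (pattern.toList, 0)).1
    = String.mk ((PySem.List.enumerate pattern.toList 0).map (fun ic =>
        if PySem.Set.contains
            (((PySem.List.enumerate pattern.toList 0).filter (fun ic => ic.2 == '.' || ic.2 == '?')).foldl
              (pvStepB0 ((PySem.List.max? groups (fun x => x)).getD 0) pattern.toList)
              (PySem.Set.empty, 0)).1 ic.1
        then '.' else ic.2))
  rw [List.foldl_filter]
  rw [show (fun (x : PySem.Set Int × Int) (y : Int × Char) =>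
        if ((fun (ic : Int × Char) => ic.2 == '.' || ic.2 == '?') y) = true
        then pvStepB0 ((PySem.List.max? groups (fun x => x)).getD 0) pattern.toList x y else x)
      = pvStepB ((PySem.List.max? groups (fun x => x)).getD 0) pattern.toList from rfl]
  have h := pvMain ((PySem.List.max? groups (fun x => x)).getD 0) pattern.toList pattern.toList []
      pattern.toList 0 PySem.Set.empty 0 (by simp) le_rfl (by simp) (by simp)
      (pvRender_empty pattern.toList).symm
  simp only [List.length_nil, Nat.cast_zero] at h
  exact congrArg String.mk h
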